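-- pv_equiv track=rewrite | github.com/dynamicrahulsaini/competitive-programming | XxOoRr.py | XXOORR
-- ===== SOURCE A (Python) =====
-- import math
--
-- def XXOORR(elements: list, n, k):
--     elements.sort()
--     p = 0
--     total_operations = 0
--     while n > 0:
--         cost = 0
--         for i in range(n):
--             t = (2 ** p) ^ elements[i]
--             if t < elements[i]:
--                 elements[i] = t
--                 cost += 1
--         total_operations += math.ceil(cost/k)
--         elements = [e for e in elements if e != 0]
--         p += 1
--         n = len(elements)
--     return total_operations
-- ===== SOURCE B (Python) =====
-- def XXOORR(elements: list, n, k):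
--     # No elements to process -> no operations.
--     if n <= 0:
--         return 0
--     # One pass: tally, per bit position, how many elements have that bit set;
--     # each bit position then costs ceil(count/k) operations.
--     counts = []
--     for e in elements:
--         i = 0
--         while e > 0:
--             if i == len(counts):
--                 counts.append(0)
--             counts[i] += e % 2
--             e //= 2
--             i += 1
--     return sum(-(-c // k) for c in counts)
-- ===== Notes on version B (the rewrite author's own statement) =====
-- stated objective: simpler
-- what changed: B replaces A's sort + repeated scan/mutate/filter rounds over the list with a single element-major pass that tallies a per-bit-position count table and then returns the sum of ceil(count/k) over the bits (plus a direct 0 for n <= 0, where A's loop never runs); B does not mutate the caller's list, while A sorts it and clears bits in place.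
-- outside the precondition, e.g. on XXOORR([2, 1], 1, 1): A returns 2, B returns 2
import Mathlib
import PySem

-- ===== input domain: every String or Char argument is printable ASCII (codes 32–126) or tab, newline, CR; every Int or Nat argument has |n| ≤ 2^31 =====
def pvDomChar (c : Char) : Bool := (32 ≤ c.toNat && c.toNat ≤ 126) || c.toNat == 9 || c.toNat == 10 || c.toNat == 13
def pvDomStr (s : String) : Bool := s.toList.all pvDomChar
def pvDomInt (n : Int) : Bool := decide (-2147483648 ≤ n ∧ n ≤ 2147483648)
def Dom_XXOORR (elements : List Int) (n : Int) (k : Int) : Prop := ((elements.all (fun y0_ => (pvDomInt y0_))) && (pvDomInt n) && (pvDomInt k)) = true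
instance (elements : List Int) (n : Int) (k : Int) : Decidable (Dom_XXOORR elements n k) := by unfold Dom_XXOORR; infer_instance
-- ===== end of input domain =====

-- B replaces A's sort + repeated scan/mutate/filter rounds with one element-major pass building a
-- per-bit count table, then sums ceil(count/k) per bit (objective: simpler). Return value only:
-- A sorts and bit-clears the caller's list in place, B leaves it untouched.

-- ===== PORT A =====
-- math.ceil(cost/k) ported as the exact integer ceiling -((-cost)//k); exact on the stated domain
-- (0 ≤ cost ≤ list length, |k| ≤ 2^31: the float quotient cannot round across an integer there).
def pvCeilDiv (cost k : Int) : Int := -(PySem.Int.floordiv (-cost) k)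

-- body of 'for i in range(n)': state (elements, cost); t = (2 ** p) ^ elements[i]
def roundF (p : Nat) (st : List Int × Int) (i : Int) : List Int × Int :=
  let e := (PySem.List.pyGet? st.1 i).getD 0   -- elements[i]; index always in range on Pre_
  let t := PySem.Int.bxor ((2 : Int) ^ p) e
  if t < e then (st.1.set i.toNat t, st.2 + 1) else st

def xoRound (els : List Int) (n : Int) (p : Nat) : List Int × Int :=
  (PySem.List.pyRange 0 n 1).foldl (roundF p) (els, 0)

-- 'while n > 0' loop; the fuel only makes the recursion total (where it runs out, e.g. on a
-- negative element, Python's loop never terminates; such inputs are outside Pre_).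
def xoLoop (k : Int) : List Int → Int → Nat → Int → Nat → Int
  | _, _, _, total, 0 => total
  | els, n, p, total, fuel+1 =>
    if n > 0 then
      let r := xoRound els n p
      let els' := r.1.filter (fun e => e != 0)
      xoLoop k els' (els'.length : Int) (p+1) (total + pvCeilDiv r.2 k) fuel
    else total

def XXOORR (elements : List Int) (n : Int) (k : Int) : Int :=
  xoLoop k (PySem.List.sorted elements (fun x => x) false) n 0 0 64

-- ===== PORT B =====
-- 'while e > 0' inner loop of Source B: extend counts if needed, add e % 2 at slot i, halve e.
def altInner (e : Int) (i : Nat) (counts : List Int) : List Int :=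
  if h : e > 0 then
    let cs := if i = counts.length then counts ++ [0] else counts
    let cs' := cs.set i (cs.getD i 0 + PySem.Int.mod e 2)
    altInner (PySem.Int.floordiv e 2) (i+1) cs'
  else counts
termination_by e.toNat
decreasing_by
  rw [PySem.Int.floordiv_eq_ediv_of_pos (by omega : (0:Int) < 2)]
  omega

def XXOORR_alt (elements : List Int) (n : Int) (k : Int) : Int :=
  if n ≤ 0 then 0
  else
    let counts := elements.foldl (fun cs e => altInner e 0 cs) []
    (counts.map (fun c => -(PySem.Int.floordiv (-c) k))).sum

-- ===== PRECONDITION & SPEC =====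
-- Pre_ restricts to the task's natural domain: either n ≤ 0 (no elements are processed), or n is
-- the list's length with nonnegative elements and (for a nonempty list) k ≠ 0.  Excluded: n > len
-- (A raises IndexError), nonempty list with k = 0 (A raises ZeroDivisionError), negative elements
-- with n > 0 (A never terminates), and 0 < n < len, where A's first round touches only the n
-- smallest elements — there A diverges unless every element outside that prefix is even, an
-- accidental corner of the in-place pass that is out of the function's natural domain.
def Pre_XXOORR (elements : List Int) (n : Int) (k : Int) : Prop :=
  n ≤ 0 ∨ (n = (elements.length : Int) ∧ (∀ e ∈ elements, 0 ≤ e) ∧ (elements = [] ∨ k ≠ 0))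
instance (elements : List Int) (n : Int) (k : Int) : Decidable (Pre_XXOORR elements n k) := by
  unfold Pre_XXOORR; infer_instance

def pvWitness_XXOORR : List Int × Int × Int := ([5, 2, 5, 16], 4, 2)

def Spec_XXOORR (elements : List Int) (n : Int) (k : Int) (out : Int) : Prop := out = XXOORR_alt elements n k
instance (elements : List Int) (n : Int) (k : Int) (out : Int) : Decidable (Spec_XXOORR elements n k out) := by unfold Spec_XXOORR; infer_instance

-- ===== CLAIM (what is proved, stated in full; the proofs are below) =====
def Claim_equal_XXOORR : Prop := ∀ (elements : List Int) (n : Int) (k : Int), Dom_XXOORR elements n k → Pre_XXOORR elements n k → Spec_XXOORR elements n k (XXOORR elements n k)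

-- ===== LEMMAS AND PROOFS =====

-- number of elements with bit p set
def cntB (p : Nat) (L : List Int) : Nat := L.countP (fun e => e.toNat.testBit p)

-- per-bit sum of ceilings over 'f' bit positions starting at p
def bitSum (k : Int) (L : List Int) : Nat → Nat → Int
  | _, 0 => 0
  | p, f+1 => pvCeilDiv ((cntB p L : Nat) : Int) k + bitSum k L (p+1) f

-- effect of one round of A on one element
def stepE (p : Nat) (e : Int) : Int :=
  if e.toNat.testBit p then ((2^p ^^^ e.toNat : Nat) : Int) else e

lemma pvCeilDiv_zero (k : Int) : pvCeilDiv 0 k = 0 := by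
  simp [pvCeilDiv, PySem.Int.floordiv]

lemma xor_bit (x p j : Nat) (h : p ≠ j) : (2^p ^^^ x).testBit j = x.testBit j := by
  rw [Nat.testBit_xor, Nat.testBit_two_pow]; simp [h]

lemma xor_two_pow_lt_iff (x p : Nat) : (2^p ^^^ x) < x ↔ x.testBit p = true := by
  have hp : (2^p ^^^ x).testBit p = !(x.testBit p) := by
    rw [Nat.testBit_xor, Nat.testBit_two_pow]; simp
  constructor
  · intro hlt; by_contra hb
    have hxb : x.testBit p = false := by
      cases hx : x.testBit p with
      | false => rfl
      | true => exact absurd hx hb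
    have : x < 2^p ^^^ x :=
      Nat.lt_of_testBit p hxb (by simp [hp, hxb]) (fun j hj => (xor_bit x p j (by omega)).symm)
    omega
  · intro hb
    exact Nat.lt_of_testBit p (by simp [hp, hb]) hb (fun j hj => xor_bit x p j (by omega))

lemma bitSum_congr (k : Int) (L M : List Int) (f : Nat) :
    ∀ p, (∀ q, p ≤ q → cntB q L = cntB q M) → bitSum k L p f = bitSum k M p f := by
  induction f with
  | zero => intro p _; rfl
  | succ f ih =>
    intro p h
    simp only [bitSum, h p le_rfl, ih (p+1) (fun q hq => h q (by omega))]

lemma bitSum_of_cnt_zero (k : Int) (L : List Int) (f : Nat) :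
    ∀ p, (∀ q, p ≤ q → cntB q L = 0) → bitSum k L p f = 0 := by
  induction f with
  | zero => intro p _; rfl
  | succ f ih =>
    intro p h
    simp only [bitSum, h p le_rfl, ih (p+1) (fun q hq => h q (by omega))]
    simp [pvCeilDiv_zero]

lemma bitSum_ext (k : Int) (L : List Int) :
    ∀ (N : Nat) (p F : Nat), N ≤ F → (∀ q, p + N ≤ q → cntB q L = 0) →
    bitSum k L p F = bitSum k L p N := by
  intro N
  induction N with
  | zero =>
    intro p F _ h
    rw [bitSum_of_cnt_zero k L F p (fun q hq => h q (by omega))]; rfl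
  | succ N ih =>
    intro p F hF h
    cases F with
    | zero => omega
    | succ F =>
      simp only [bitSum]
      rw [ih (p+1) F (by omega) (fun q hq => h q (by omega))]

-- one round of A, done on an index range over pre ++ suf: maps stepE over suf and counts bit p
lemma round_go (p : Nat) :
    ∀ (suf pre : List Int) (c : Int), (∀ e ∈ suf, 0 ≤ e) →
    ((PySem.List.pyRange ((pre.length : Nat) : Int) (((pre.length + suf.length : Nat) : Nat) : Int) 1).foldl
      (roundF p) (pre ++ suf, c))
    = (pre ++ suf.map (stepE p), c + ((cntB p suf : Nat) : Int)) := by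
  intro suf
  induction suf with
  | nil =>
    intro pre c _
    rw [PySem.List.pyRange_one_eq_nil (by simp)]
    simp [cntB]
  | cons e rest ih =>
    intro pre c hnn
    have he : 0 ≤ e := hnn e (List.mem_cons_self ..)
    have hlt : ((pre.length : Nat) : Int) < ((pre.length + (e :: rest).length : Nat) : Int) := by
      simp only [List.length_cons]
      push_cast
      omega
    rw [PySem.List.pyRange_one_cons hlt, List.foldl_cons]
    -- evaluate the head step
    have hget : (PySem.List.pyGet? (pre ++ e :: rest) ((pre.length : Nat) : Int)).getD 0 = e := by
      rw [PySem.List.pyGet?_natCast, List.getElem?_append_right (le_refl _)]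
      simp
    have hcast : ((2:Int) ^ p) = ((2^p : Nat) : Int) := by push_cast; ring
    have ht : PySem.Int.bxor ((2:Int) ^ p) e = ((2^p ^^^ e.toNat : Nat) : Int) := by
      rw [hcast]
      conv_lhs => rw [← Int.toNat_of_nonneg he]
      rw [PySem.Int.bxor_natCast]
    have hstep : roundF p (pre ++ e :: rest, c) ((pre.length : Nat) : Int)
        = (pre ++ stepE p e :: rest, c + if e.toNat.testBit p then 1 else 0) := by
      simp only [roundF, hget, ht]
      by_cases hb : e.toNat.testBit p
      · have hlt2 : ((2^p ^^^ e.toNat : Nat) : Int) < e := by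
          conv_rhs => rw [← Int.toNat_of_nonneg he]
          exact_mod_cast (xor_two_pow_lt_iff e.toNat p).mpr hb
        rw [if_pos hlt2]
        simp only [Int.toNat_natCast, List.set_append, lt_irrefl, if_neg (lt_irrefl _)]
        simp [stepE, hb]
      · have hge : ¬ ((2^p ^^^ e.toNat : Nat) : Int) < e := by
          conv_rhs => rw [← Int.toNat_of_nonneg he]
          intro hcon
          exact hb ((xor_two_pow_lt_iff e.toNat p).mp (by exact_mod_cast hcon))
        rw [if_neg hge]
        simp [stepE, hb]
    rw [hstep]
    have hr : ((pre.length : Nat) : Int) + 1 = (((pre ++ [stepE p e]).length : Nat) : Int) := by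
      simp
    have hr2 : ((pre.length + (e :: rest).length : Nat) : Int)
        = (((pre ++ [stepE p e]).length + rest.length : Nat) : Int) := by
      simp; omega
    rw [hr, hr2]
    have := ih (pre ++ [stepE p e]) (c + if e.toNat.testBit p then 1 else 0)
      (fun x hx => hnn x (List.mem_cons_of_mem _ hx))
    rw [List.append_assoc] at this
    simp only [List.singleton_append] at this
    rw [this]
    simp only [cntB, List.countP_cons, List.append_assoc, List.singleton_append, List.map_cons,
      Prod.mk.injEq]
    refine ⟨trivial, ?_⟩
    push_cast
    by_cases hb : e.toNat.testBit p <;> simp [hb] <;> ring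

lemma round_spec (els : List Int) (p : Nat) (hnn : ∀ e ∈ els, 0 ≤ e) :
    xoRound els ((els.length : Nat) : Int) p = (els.map (stepE p), ((cntB p els : Nat) : Int)) := by
  have := round_go p els [] 0 hnn
  simpa [xoRound] using this

-- after a round, counts of the strictly higher bits are unchanged by clearing bit p and
-- dropping the zeros (an element that became 0 was exactly 2^p and had no higher bit)
lemma cnt_preserved (p q : Nat) (hq : p < q) (els : List Int) (hnn : ∀ e ∈ els, 0 ≤ e) :
    cntB q (((els.map (stepE p)).filter (fun e => e != 0))) = cntB q els := by
  unfold cntB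
  rw [List.countP_filter, List.countP_map]
  apply List.countP_congr
  intro e hme
  have he : 0 ≤ e := hnn e hme
  simp only [Function.comp]
  by_cases hb : e.toNat.testBit p
  · simp only [stepE, hb, if_pos]
    by_cases hz : (2^p ^^^ e.toNat) = 0
    · have hx : e.toNat = 2^p := (Nat.xor_eq_zero_iff.mp hz).symm
      have hq2 : e.toNat.testBit q = false := by
        rw [hx, Nat.testBit_two_pow]; simp; omega
      simp [hz, hq2]
    · have hnz : (((2^p ^^^ e.toNat : Nat) : Int)) ≠ 0 := by
        exact_mod_cast fun hc => hz (by exact_mod_cast hc)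
      simp only [Int.toNat_natCast]
      rw [xor_bit e.toNat p q (by omega)]
      simp
      intro _ hcon
      exact hz (by rw [← hcon]; exact Nat.xor_self _)
  · simp only [stepE, hb, if_neg, Bool.false_eq_true, not_false_iff, ite_false]
    by_cases hz : e = 0
    · simp [hz]
    · simp [hz]

lemma stepE_nonneg (p : Nat) (e : Int) (he : 0 ≤ e) : 0 ≤ stepE p e := by
  unfold stepE; split
  · positivity
  · exact he

lemma loop_spec (k : Int) :
    ∀ (fuel : Nat) (els : List Int) (p : Nat) (total : Int), (∀ e ∈ els, 0 ≤ e) →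
    xoLoop k els ((els.length : Nat) : Int) p total fuel = total + bitSum k els p fuel := by
  intro fuel
  induction fuel with
  | zero => intro els p total _; simp [xoLoop, bitSum]
  | succ fuel ih =>
    intro els p total hnn
    cases hels : els with
    | nil =>
      simp only [xoLoop, hels]
      rw [if_neg (by simp)]
      rw [bitSum_of_cnt_zero k [] (fuel+1) p (fun q _ => by simp [cntB])]
      ring
    | cons a l =>
      rw [← hels]
      have hpos : ((els.length : Nat) : Int) > 0 := by simp [hels]
      simp only [xoLoop]
      rw [if_pos hpos]
      rw [round_spec els p hnn]
      set els' := (els.map (stepE p)).filter (fun e => e != 0) with hels'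
      have hnn' : ∀ e ∈ els', 0 ≤ e := by
        intro e hme
        rw [hels'] at hme
        obtain ⟨x, hx, hfx⟩ := List.mem_map.mp (List.mem_of_mem_filter hme)
        exact hfx ▸ stepE_nonneg p x (hnn x hx)
      rw [ih els' (p+1) (total + pvCeilDiv ((cntB p els : Nat) : Int) k) hnn']
      have hcnt : bitSum k els' (p+1) fuel = bitSum k els (p+1) fuel :=
        bitSum_congr k els' els fuel (p+1) (fun q hq => cnt_preserved p q (by omega) els hnn)
      rw [hcnt]
      simp only [bitSum]
      ring

-- ===== B-side lemmas =====

lemma altInner_zero (i : Nat) (cs : List Int) : altInner 0 i cs = cs := by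
  rw [altInner]; simp

lemma altInner_getD :
    ∀ (N : Nat) (e : Int) (i : Nat) (cs : List Int), e.toNat ≤ N → 0 ≤ e → i ≤ cs.length →
    ∀ j, (altInner e i cs).getD j 0
      = cs.getD j 0 + (if i ≤ j ∧ e.toNat.testBit (j - i) then 1 else 0) := by
  intro N
  induction N with
  | zero =>
    intro e i cs hN he _ j
    have he0 : e = 0 := by omega
    subst he0
    rw [altInner_zero]
    simp [Nat.zero_testBit]
  | succ N ih =>
    intro e i cs hN he hi j
    by_cases hpos : e > 0
    · rw [altInner, dif_pos hpos]
      have hfd : PySem.Int.floordiv e 2 = e / 2 :=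
        PySem.Int.floordiv_eq_ediv_of_pos (by omega)
      have hmd : PySem.Int.mod e 2 = e % 2 :=
        PySem.Int.mod_eq_emod_of_pos (by omega)
      set base := if i = cs.length then cs ++ [0] else cs with hbase
      have hblen : i < base.length := by
        rw [hbase]; by_cases h : i = cs.length <;> simp [h] <;> omega
      have hbgetD : ∀ j : Nat, base[j]?.getD 0 = cs[j]?.getD 0 := by
        intro j
        rw [hbase]
        by_cases h : i = cs.length
        · rw [if_pos h]
          rcases lt_trichotomy j cs.length with hj | hj | hj
          · rw [List.getElem?_append_left hj]
          · subst hj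
            rw [List.getElem?_append_right (le_refl _), List.getElem?_eq_none (le_refl _)]
            simp
          · rw [List.getElem?_eq_none (by simp; omega : (cs ++ [0]).length ≤ j),
              List.getElem?_eq_none (by omega : cs.length ≤ j)]
        · rw [if_neg h]
      set cs' := base.set i (base.getD i 0 + PySem.Int.mod e 2) with hcs'
      have hlen' : cs'.length = base.length := by rw [hcs']; simp
      have hdiv : (e / 2).toNat = e.toNat / 2 := by omega
      have hrec := ih (e / 2) (i+1) cs'
        (by omega)
        (by positivity)
        (by rw [hlen']; omega)
        j
      rw [hfd, hrec]
      have hgd' : ∀ j, cs'.getD j 0 = cs.getD j 0 + (if j = i then PySem.Int.mod e 2 else 0) := by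
        intro j
        rw [hcs']
        by_cases hj : j = i
        · subst hj
          simp [List.getD_eq_getElem?_getD, List.getElem?_set_self hblen, hbgetD]
        · rw [List.getD_eq_getElem?_getD, List.getElem?_set_ne (by omega)]
          simp [List.getD_eq_getElem?_getD, hbgetD, hj]
      rw [hgd' j]
      have hmod : PySem.Int.mod e 2 = ((e.toNat % 2 : Nat) : Int) := by
        rw [hmd]
        conv_lhs => rw [← Int.toNat_of_nonneg he]
        push_cast
        rfl
      rw [hmod, hdiv]
      rcases lt_trichotomy j i with hj | hj | hj
      · rw [if_neg (by omega : ¬ j = i), if_neg (fun hc => absurd hc.1 (by omega)),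
          if_neg (fun hc => absurd hc.1 (by omega))]
        ring
      · subst hj
        have hf : ¬ (j + 1 ≤ j) := by omega
        rcases Nat.mod_two_eq_zero_or_one e.toNat with hm | hm
        · have htb : e.toNat.testBit (j - j) = false := by
            simp [Nat.testBit_zero, hm]
          simp [htb, hm, hf]
        · have htb : e.toNat.testBit (j - j) = true := by
            simp [Nat.testBit_zero, hm]
          simp [htb, hm, hf]
      · rw [if_neg (by omega : ¬ j = i)]
        have hbit : e.toNat.testBit (j - i) = (e.toNat / 2).testBit (j - (i+1)) := by
          have hsub : j - i = (j - (i+1)) + 1 := by omega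
          rw [hsub, Nat.testBit_succ]
        rw [hbit]
        by_cases htb : (e.toNat / 2).testBit (j - (i+1)) = true
        · rw [if_pos ⟨by omega, htb⟩, if_pos ⟨by omega, htb⟩]
          ring
        · rw [if_neg (fun hc => htb hc.2), if_neg (fun hc => htb hc.2)]
          ring
    · have he0 : e = 0 := by omega
      subst he0
      rw [altInner_zero]
      simp [Nat.zero_testBit]

lemma altInner_len_le :
    ∀ (m : Nat) (e : Int) (i : Nat) (cs : List Int), e.toNat < 2^m →
    (altInner e i cs).length ≤ max cs.length (i + m) := by
  intro m
  induction m with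
  | zero =>
    intro e i cs hm
    have : ¬ e > 0 := by
      intro hp
      have : 1 ≤ e.toNat := by omega
      simp at hm; omega
    rw [altInner, dif_neg this]
    omega
  | succ m ih =>
    intro e i cs hm
    by_cases hpos : e > 0
    · rw [altInner, dif_pos hpos]
      have hfd : PySem.Int.floordiv e 2 = e / 2 :=
        PySem.Int.floordiv_eq_ediv_of_pos (by omega)
      have hb : (e / 2).toNat < 2^m := by
        have h2 : (2:Nat)^(m+1) = 2 * 2^m := by ring
        omega
      rw [hfd]
      have hle := ih (e/2) (i+1) ((if i = cs.length then cs ++ [0] else cs).set i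
        ((if i = cs.length then cs ++ [0] else cs).getD i 0 + PySem.Int.mod e 2)) hb
      simp only [List.length_set] at hle
      by_cases h : i = cs.length <;> simp [h] at hle ⊢ <;> omega
    · rw [altInner, dif_neg hpos]; omega

lemma altInner_len_ge :
    ∀ (N : Nat) (e : Int) (i : Nat) (cs : List Int), e.toNat ≤ N → 0 ≤ e → i ≤ cs.length →
    cs.length ≤ (altInner e i cs).length ∧
    ∀ j, (altInner e i cs).length ≤ j → i ≤ j → e.toNat.testBit (j - i) = false := by
  intro N
  induction N with
  | zero =>
    intro e i cs hN he hi
    have he0 : e = 0 := by omega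
    subst he0
    rw [altInner_zero]
    exact ⟨le_refl _, fun j _ _ => by simp [Nat.zero_testBit]⟩
  | succ N ih =>
    intro e i cs hN he hi
    by_cases hpos : e > 0
    · rw [altInner, dif_pos hpos]
      dsimp only
      have hfd : PySem.Int.floordiv e 2 = e / 2 :=
        PySem.Int.floordiv_eq_ediv_of_pos (by omega)
      set base := if i = cs.length then cs ++ [0] else cs with hbase
      set cs' := base.set i (base.getD i 0 + PySem.Int.mod e 2) with hcs'
      have hlen' : cs'.length = base.length := by rw [hcs']; simp
      have hbl : i + 1 ≤ cs'.length ∧ cs.length ≤ cs'.length := by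
        rw [hlen', hbase]
        by_cases h : i = cs.length <;> simp [h] <;> omega
      rw [hfd]
      have hdiv : (e / 2).toNat = e.toNat / 2 := by omega
      have hrec := ih (e/2) (i+1) cs' (by omega) (by positivity) hbl.1
      refine ⟨le_trans hbl.2 hrec.1, ?_⟩
      intro j hj hij
      have hij1 : i + 1 ≤ j := by
        have := le_trans hbl.1 hrec.1
        omega
      have hsub : j - i = (j - (i+1)) + 1 := by omega
      rw [hsub, Nat.testBit_succ]
      have := hrec.2 j hj hij1
      rw [hdiv] at this
      exact this
    · have he0 : e = 0 := by omega
      subst he0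
      rw [altInner_zero]
      exact ⟨le_refl _, fun j _ _ => by simp [Nat.zero_testBit]⟩

lemma fold_counts :
    ∀ (L cs : List Int), (∀ e ∈ L, 0 ≤ e) →
    ∀ j : Nat, (L.foldl (fun cs e => altInner e 0 cs) cs).getD j 0
      = cs.getD j 0 + ((cntB j L : Nat) : Int) := by
  intro L
  induction L with
  | nil => intro cs _ j; simp [cntB]
  | cons e L ih =>
    intro cs hnn j
    simp only [List.foldl_cons]
    rw [ih (altInner e 0 cs) (fun x hx => hnn x (List.mem_cons_of_mem _ hx)) j]
    rw [altInner_getD e.toNat e 0 cs (le_refl _) (hnn e (List.mem_cons_self ..)) (by omega) j]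
    simp only [cntB, List.countP_cons, Nat.sub_zero]
    by_cases hb : e.toNat.testBit j = true
    · rw [if_pos ⟨by omega, hb⟩]
      simp only [hb, if_pos]
      push_cast
      ring
    · rw [if_neg (fun hc => hb hc.2)]
      simp only [hb, if_neg, Bool.false_eq_true, not_false_iff, ite_false]
      push_cast
      ring

lemma fold_bits :
    ∀ (L cs : List Int), (∀ e ∈ L, 0 ≤ e) →
    cs.length ≤ (L.foldl (fun cs e => altInner e 0 cs) cs).length ∧
    ∀ j : Nat, (L.foldl (fun cs e => altInner e 0 cs) cs).length ≤ j →
      ∀ e ∈ L, e.toNat.testBit j = false := by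
  intro L
  induction L with
  | nil => intro cs _; exact ⟨le_refl _, fun j _ e he => absurd he (List.not_mem_nil)⟩
  | cons e L ih =>
    intro cs hnn
    simp only [List.foldl_cons]
    have h1 := altInner_len_ge e.toNat e 0 cs (le_refl _) (hnn e (List.mem_cons_self ..)) (by omega)
    have h2 := ih (altInner e 0 cs) (fun x hx => hnn x (List.mem_cons_of_mem _ hx))
    refine ⟨le_trans h1.1 h2.1, ?_⟩
    intro j hj x hx
    rcases List.mem_cons.mp hx with hx | hx
    · subst hx
      have := h1.2 j (le_trans h2.1 hj) (by omega)
      simpa using this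
    · exact h2.2 j hj x hx

lemma fold_len_le :
    ∀ (L cs : List Int), (∀ e ∈ L, e.toNat < 2^32) →
    (L.foldl (fun cs e => altInner e 0 cs) cs).length ≤ max cs.length 32 := by
  intro L
  induction L with
  | nil => intro cs _; exact le_max_left _ _
  | cons e L ih =>
    intro cs hb
    simp only [List.foldl_cons]
    have h1 := ih (altInner e 0 cs) (fun x hx => hb x (List.mem_cons_of_mem _ hx))
    have h2 := altInner_len_le 32 e 0 cs (hb e (List.mem_cons_self ..))
    omega

lemma sum_map_eq_bitSum (k : Int) (L : List Int) :
    ∀ (C : List Int) (p : Nat), (∀ j : Nat, C.getD j 0 = ((cntB (p+j) L : Nat) : Int)) →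
    (C.map (fun c => -(PySem.Int.floordiv (-c) k))).sum = bitSum k L p C.length := by
  intro C
  induction C with
  | nil => intro p _; simp [bitSum]
  | cons c C ih =>
    intro p h
    simp only [List.map_cons, List.sum_cons, List.length_cons]
    have h0 : c = ((cntB p L : Nat) : Int) := by simpa using h 0
    rw [bitSum, ih (p+1) (fun j => by
      have := h (j+1)
      simp only [List.getD_cons_succ] at this
      rw [this]
      congr 2
      omega)]
    rw [h0]
    rfl

-- ===== VERDICT (by name: the statement is the Claim_ definition above) =====
theorem XXOORR_spec : Claim_equal_XXOORR := by
  intro elements n k hdom hpre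
  by_cases hn0 : n ≤ 0
  · -- the while loop never runs; both sides return 0
    unfold Spec_XXOORR XXOORR XXOORR_alt xoLoop
    rw [if_neg (by omega), if_pos hn0]
  obtain ⟨hn, hnn, -⟩ := hpre.resolve_left hn0
  unfold Spec_XXOORR XXOORR XXOORR_alt
  rw [if_neg hn0]
  dsimp only
  -- A side: the loop computes the per-bit ceiling sum of the sorted list
  have hperm := PySem.List.sorted_perm elements (fun x => x) false
  have hnnS : ∀ e ∈ PySem.List.sorted elements (fun x => x) false, 0 ≤ e :=
    fun e he => hnn e (hperm.mem_iff.mp he)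
  have hlenS : (((PySem.List.sorted elements (fun x => x) false).length : Nat) : Int) = n := by
    rw [PySem.List.length_sorted, hn]
  rw [← hlenS, loop_spec k 64 _ 0 0 hnnS]
  have hA : bitSum k (PySem.List.sorted elements (fun x => x) false) 0 64
      = bitSum k elements 0 64 :=
    bitSum_congr k _ elements 64 0 (fun q _ => by unfold cntB; exact hperm.countP_eq _)
  rw [hA]
  -- B side: the count table holds the per-bit counts and covers every set bit
  have hcounts := fold_counts elements [] hnn
  have hbits := fold_bits elements [] hnn
  have hbound : ∀ e ∈ elements, e.toNat < 2^32 := by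
    intro e he
    simp only [Dom_XXOORR, Bool.and_eq_true, List.all_eq_true, pvDomInt, decide_eq_true_eq] at hdom
    have := hdom.1.1 e he
    omega
  have hlen32 : (elements.foldl (fun cs e => altInner e 0 cs) []).length ≤ 32 :=
    le_trans (fold_len_le elements [] hbound) (by simp)
  rw [sum_map_eq_bitSum k elements _ 0 (fun j => by rw [hcounts j]; norm_num)]
  rw [bitSum_ext k elements (elements.foldl (fun cs e => altInner e 0 cs) []).length 0 64
    (by omega)
    (fun q hq => by
      unfold cntB
      rw [List.countP_eq_zero]
      intro a ha
      have := hbits.2 q (by omega) a ha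
      simp [this])]
  ring
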